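-- pv_equiv track=rewrite | github.com/joshuajansi13/CPE_593_Data_Structures | Coding_HW/finalProject/src/bw_coding.py | burrows_wheeler_decode
-- ===== SOURCE A (Python) =====
-- def burrows_wheeler_decode(bwt_string,add_char='!'):
--     length_bwt = len(bwt_string)
--     sorted_bwt = sorted(bwt_string)
--     left_shift = [0] * length_bwt
--     start_index = bwt_string.index(add_char)
--
--     positions = [[] for _ in range(128)]
--
--     for i, char in enumerate(bwt_string):
--         positions[ord(char)].append(i)
--
--     for i in range(length_bwt):
--         left_shift[i] = positions[ord(sorted_bwt[i])].pop(0)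
--
--     decoded_chars = [''] * length_bwt
--     current_index = start_index
--     for i in range(length_bwt):
--         current_index = left_shift[current_index]
--         decoded_chars[length_bwt - 1 - i] = bwt_string[current_index]
--
--     decoded_string = ''.join(decoded_chars)
--     return decoded_string[::-1].rstrip(add_char)
-- ===== SOURCE B (Python) =====
-- def burrows_wheeler_decode(bwt_string, add_char='!'):
--     # Counting sort over the 128-symbol ASCII alphabet: one counting pass,
--     # prefix sums, then one scatter pass builds left_shift directly --
--     # no comparison sort, no bucket lists, no pop(0).
--     n = len(bwt_string)
--     start = bwt_string.index(add_char)
--     counts = [0] * 128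
--     for ch in bwt_string:
--         counts[ord(ch)] += 1
--     offs = [0] * 128
--     total = 0
--     for c in range(128):
--         offs[c] = total
--         total += counts[c]
--     left_shift = [0] * n
--     for i, ch in enumerate(bwt_string):
--         c = ord(ch)
--         left_shift[offs[c]] = i
--         offs[c] += 1
--     out = []
--     cur = start
--     for _ in range(n):
--         cur = left_shift[cur]
--         out.append(bwt_string[cur])
--     return ''.join(out).rstrip(add_char)
-- ===== Notes on version B (the rewrite author's own statement) =====
-- stated objective: faster
-- what changed: A builds the left-shift table by comparison-sorting the characters and popping the front of 128 per-character bucket lists (list.pop(0) is linear, so quadratic on repetitive input) and fills the output backwards then reverses; B builds the same table by a counting sort over the 128-symbol ASCII alphabet (one counting pass, prefix sums, one scatter pass -- no sort, no bucket lists, no pops) and builds the output forward.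
import Mathlib
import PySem

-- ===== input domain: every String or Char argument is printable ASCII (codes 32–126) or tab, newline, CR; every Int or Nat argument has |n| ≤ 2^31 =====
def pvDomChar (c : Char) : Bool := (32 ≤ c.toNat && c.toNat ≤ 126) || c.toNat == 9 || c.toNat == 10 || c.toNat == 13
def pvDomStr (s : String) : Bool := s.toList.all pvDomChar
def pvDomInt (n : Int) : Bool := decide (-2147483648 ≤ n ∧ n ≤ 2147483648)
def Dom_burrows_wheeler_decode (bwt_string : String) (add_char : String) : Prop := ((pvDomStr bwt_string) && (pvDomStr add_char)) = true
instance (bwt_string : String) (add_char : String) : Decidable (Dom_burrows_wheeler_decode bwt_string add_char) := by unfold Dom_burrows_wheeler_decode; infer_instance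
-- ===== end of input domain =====

-- B replaces A's comparison sort + 128 per-character bucket lists + pop(0) construction of the
-- left-shift table by a counting sort over the ASCII alphabet (one counting pass, prefix sums,
-- one scatter pass; measured faster in a timing run), and builds the output forward instead
-- of filling it backwards and reversing. Equality is proved on Dom under Pre_ (Pre_ excludes
-- exactly the inputs where both Pythons raise ValueError).

-- shared primitive port of Python's s.rstrip(chars): drop trailing characters contained in chars
def pvRstripChars (cs chars : List Char) : List Char :=
  (cs.reverse.dropWhile (fun c => chars.contains c)).reverse

-- ===== PORT A =====
def burrows_wheeler_decode (bwt_string : String) (add_char : String) : String :=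
  let cs := bwt_string.toList
  let acs := add_char.toList
  let n := cs.length                                                -- length_bwt
  let sorted_bwt := PySem.List.sorted cs (fun c => c) false         -- sorted(bwt_string)
  let start_index := (PySem.Chars.find cs acs).toNat                -- bwt_string.index(add_char); Pre_ excludes find = -1 (Python ValueError)
  let positions0 : List (List Nat) := (List.range 128).map (fun _ => ([] : List Nat))
  let positions := cs.zipIdx.foldl                                  -- for i, char in enumerate(bwt_string): positions[ord(char)].append(i)
      (fun ps (p : Char × Nat) => ps.set p.1.toNat (ps.getD p.1.toNat [] ++ [p.2])) positions0
  let st := (List.range n).foldl                                    -- for i in range(length_bwt): left_shift[i] = positions[ord(sorted_bwt[i])].pop(0)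
      (fun (st : List (List Nat) × List Nat) k =>
        let c := sorted_bwt.getD k ' '
        let b := st.1.getD c.toNat []
        (st.1.set c.toNat b.tail, st.2.set k (b.headD 0)))          -- pop(0); the bucket is provably never empty, headD 0 only totalizes
      (positions, List.replicate n 0)
  let left_shift := st.2
  let fin := (List.range n).foldl                                   -- for i in range(length_bwt): backwards fill of decoded_chars
      (fun (st : List Char × Nat) i =>
        let cur := left_shift.getD st.2 0
        (st.1.set (n - 1 - i) (cs.getD cur ' '), cur))              -- every slot is overwritten; ' ' only replaces Python's placeholder ''
      (List.replicate n ' ', start_index)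
  String.ofList (pvRstripChars fin.1.reverse acs)                   -- decoded_string[::-1].rstrip(add_char)

-- ===== PORT B =====
def burrows_wheeler_decode_alt (bwt_string : String) (add_char : String) : String :=
  let cs := bwt_string.toList
  let acs := add_char.toList
  let n := cs.length
  let start := (PySem.Chars.find cs acs).toNat                      -- bwt_string.index(add_char)
  let counts := cs.foldl                                            -- for ch in bwt_string: counts[ord(ch)] += 1
      (fun a ch => a.set ch.toNat (a.getD ch.toNat 0 + 1)) (List.replicate 128 0)
  let offs := ((List.range 128).foldl                               -- for c in range(128): offs[c] = total; total += counts[c]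
      (fun (st : List Nat × Nat) c => (st.1.set c st.2, st.2 + counts.getD c 0))
      (List.replicate 128 0, 0)).1
  let st := cs.zipIdx.foldl                                         -- for i, ch: left_shift[offs[ord(ch)]] = i; offs[ord(ch)] += 1
      (fun (st : List Nat × List Nat) (p : Char × Nat) =>
        (st.1.set p.1.toNat (st.1.getD p.1.toNat 0 + 1), st.2.set (st.1.getD p.1.toNat 0) p.2))
      (offs, List.replicate n 0)
  let left_shift := st.2
  let fin := (List.range n).foldl                                   -- for _ in range(n): cur = left_shift[cur]; out.append(bwt_string[cur])
      (fun (st : List Char × Nat) _ =>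
        let cur := left_shift.getD st.2 0
        (st.1 ++ [cs.getD cur ' '], cur))
      (([] : List Char), start)
  String.ofList (pvRstripChars fin.1 acs)                           -- ''.join(out).rstrip(add_char)

-- ===== PRECONDITION & SPEC =====
-- Pre_ excludes exactly the inputs where add_char does not occur in bwt_string, on which
-- Python's bwt_string.index(add_char) raises ValueError (both in A and in B).
def Pre_burrows_wheeler_decode (bwt_string : String) (add_char : String) : Prop :=
  PySem.Str.find bwt_string add_char ≠ -1
instance (bwt_string : String) (add_char : String) : Decidable (Pre_burrows_wheeler_decode bwt_string add_char) := by unfold Pre_burrows_wheeler_decode; infer_instance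
def pvWitness_burrows_wheeler_decode : String × String := ("annb!aa", "!")

def Spec_burrows_wheeler_decode (bwt_string : String) (add_char : String) (out : String) : Prop := out = burrows_wheeler_decode_alt bwt_string add_char
instance (bwt_string : String) (add_char : String) (out : String) : Decidable (Spec_burrows_wheeler_decode bwt_string add_char out) := by unfold Spec_burrows_wheeler_decode; infer_instance

-- ===== CLAIM (what is proved, stated in full; the proofs are below) =====
def Claim_equal_burrows_wheeler_decode : Prop := ∀ (bwt_string : String) (add_char : String), Dom_burrows_wheeler_decode bwt_string add_char → Pre_burrows_wheeler_decode bwt_string add_char → Spec_burrows_wheeler_decode bwt_string add_char (burrows_wheeler_decode bwt_string add_char)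

-- ===== LEMMAS AND PROOFS =====

-- The stable-sort key on indices: character of cs at i, ties by index.
def pvKey (cs : List Char) (i : Nat) : Char := cs.getD i ' '
def pvKlt (cs : List Char) (a b : Nat) : Prop := pvKey cs a < pvKey cs b ∨ (pvKey cs a = pvKey cs b ∧ a < b)

-- occurrence list of character c: its positions in cs, ascending
def pvOcc (cs : List Char) (c : Char) : List Nat :=
  (List.range cs.length).filter (fun i => pvKey cs i == c)

-- the value A's bucket-pop loop writes into left_shift[k]
def pvL (cs : List Char) (k : Nat) : Nat :=
  let s := PySem.List.sorted cs (fun c => c) false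
  let c := s.getD k ' '
  (pvOcc cs c).getD ((s.take k).count c) 0

-- B's counting-sort view: positions bucketed by character CODE, concatenated in code order
def pvCode (cs : List Char) (i : Nat) : Nat := (cs.getD i ' ').toNat
def pvOccC (cs : List Char) (c : Nat) : List Nat :=
  (List.range cs.length).filter (fun i => pvCode cs i == c)
def pvBase (cs : List Char) (c : Nat) : Nat :=
  ((List.range c).map (fun c' => (pvOccC cs c').length)).sum
def pvSegs (cs : List Char) : List (List Nat) := (List.range 128).map (pvOccC cs)

-- the decoded character chain and the final chain index
def pvChain (ls : List Nat) (cs : List Char) : Nat → Nat → List Char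
  | _,   0     => []
  | cur, r + 1 => cs.getD (ls.getD cur 0) ' ' :: pvChain ls cs (ls.getD cur 0) r
def pvEnd (ls : List Nat) : Nat → Nat → Nat
  | cur, 0     => cur
  | cur, r + 1 => pvEnd ls (ls.getD cur 0) r

theorem pv_drop_set (l : List Char) (m : Nat) (v : Char) (h : m < l.length) : (l.set m v).drop m = v :: l.drop (m+1) := by
  apply List.ext_getElem
  · simp; omega
  · intro i h1 h2
    rcases i with _ | i
    · simp
    · simp only [List.getElem_drop, List.getElem_cons_succ, List.getElem_set]
      rw [if_neg (by omega)]
      congr 1; omega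

theorem pv_getD_set_ne {α : Type} (l : List α) (d : α) (i j : Nat) (v : α) (h : i ≠ j) :
    (l.set i v).getD j d = l.getD j d := by
  simp [List.getD_eq_getElem?_getD, List.getElem?_set_ne h]

theorem pv_getD_set_self {α : Type} (l : List α) (d : α) (j : Nat) (v : α) (hj : j < l.length) :
    (l.set j v).getD j d = v := by
  simp [List.getD_eq_getElem?_getD, List.getElem?_set_self hj]

theorem pv_char_toNat_inj (a b : Char) : a.toNat = b.toNat ↔ a = b :=
  ⟨fun h => Char.ext (UInt32.toNat_inj.mp h), fun h => h ▸ rfl⟩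

theorem pv_char_lt_of_toNat_lt (a b : Char) (h : a.toNat < b.toNat) : a < b := by
  rw [Char.lt_def, UInt32.lt_iff_toNat_lt]; exact h

theorem pv_eq_of_perm_of_pairwise (cs : List Char) (l₁ l₂ : List Nat) (hp : l₁.Perm l₂)
    (h₁ : l₁.Pairwise (pvKlt cs)) (h₂ : l₂.Pairwise (pvKlt cs)) : l₁ = l₂ := by
  refine List.Perm.eq_of_pairwise ?_ h₁ h₂ hp
  intro a b _ _ hab hba
  rcases hab with h | ⟨he, hl⟩ <;> rcases hba with h' | ⟨he', hl'⟩
  · exact absurd h' (lt_asymm h)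
  · exact absurd h (he' ▸ lt_irrefl _)
  · exact absurd h' (he ▸ lt_irrefl _)
  · omega

-- ---- characterisation of A's bucket construction ----
lemma pv_zipIdx_filter (c : Char) :
    ∀ (l : List Char) (k : Nat),
      ((List.zipIdx l k).filter (fun p => p.1 == c)).map Prod.snd
        = (List.range' k l.length).filter (fun i => l.getD (i - k) ' ' == c) := by
  intro l
  induction l with
  | nil => intro k; simp
  | cons a t ih =>
    intro k
    rw [List.zipIdx_cons, List.length_cons, List.range'_succ]
    have htail : (List.range' (k+1) t.length).filter (fun i => (a :: t).getD (i - k) ' ' == c)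
        = (List.range' (k+1) t.length).filter (fun i => t.getD (i - (k+1)) ' ' == c) := by
      apply List.filter_congr
      intro i hi
      have h1 : k + 1 ≤ i := (List.mem_range'_1.mp hi).1
      have h2 : i - k = (i - (k+1)) + 1 := by omega
      rw [h2, List.getD_cons_succ]
    rw [List.filter_cons, List.filter_cons]
    simp only [Nat.sub_self, List.getD_cons_zero]
    by_cases h : a == c
    · rw [if_pos h, if_pos h, List.map_cons, ih (k+1), htail]
    · rw [if_neg (by simpa using h), if_neg (by simpa using h), ih (k+1), htail]

lemma pv_occ_eq (cs : List Char) (c : Char) :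
    (cs.zipIdx.filter (fun p => p.1 == c)).map Prod.snd = pvOcc cs c := by
  rw [pv_zipIdx_filter c cs 0, pvOcc, List.range_eq_range']
  apply List.filter_congr
  intro i _
  simp [pvKey]

lemma pv_occ_pairwise (cs : List Char) (c : Char) : (pvOcc cs c).Pairwise (· < ·) :=
  List.Pairwise.filter _ List.pairwise_lt_range

lemma pv_mem_occ (cs : List Char) (c : Char) (i : Nat) :
    i ∈ pvOcc cs c ↔ i < cs.length ∧ pvKey cs i = c := by
  simp [pvOcc, List.mem_filter, List.mem_range]

lemma pv_occ_length (cs : List Char) (c : Char) : (pvOcc cs c).length = cs.count c := by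
  have hmap : (List.range cs.length).map (fun i => cs.getD i ' ') = cs := by
    apply List.ext_getElem
    · simp
    · intro i h1 h2
      rw [List.getElem_map, List.getElem_range, List.getD_eq_getElem?_getD,
        List.getElem?_eq_getElem h2, Option.getD_some]
  rw [pvOcc, ← List.countP_eq_length_filter, List.count_eq_countP]
  conv_rhs => rw [← hmap]
  rw [List.countP_map]
  rfl

lemma pv_bucket_len :
    ∀ (l : List (Char × Nat)) (ps : List (List Nat)),
      (l.foldl (fun ps p => ps.set p.1.toNat (ps.getD p.1.toNat [] ++ [p.2])) ps).length = ps.length := by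
  intro l
  induction l with
  | nil => intro ps; rfl
  | cons p t ih => intro ps; rw [List.foldl_cons, ih, List.length_set]

lemma pv_bucket_foldl :
    ∀ (l : List (Char × Nat)) (ps : List (List Nat)), (∀ p ∈ l, p.1.toNat < ps.length) →
      ∀ j, j < ps.length →
      (l.foldl (fun ps p => ps.set p.1.toNat (ps.getD p.1.toNat [] ++ [p.2])) ps).getD j []
        = ps.getD j [] ++ (l.filter (fun p => p.1.toNat == j)).map Prod.snd := by
  intro l
  induction l with
  | nil => intro ps _ j _; simp
  | cons p t ih =>
    intro ps hlt j hj
    rw [List.foldl_cons, List.filter_cons]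
    have hjlen : j < (ps.set p.1.toNat (ps.getD p.1.toNat [] ++ [p.2])).length := by
      rw [List.length_set]; exact hj
    have ihx := ih (ps.set p.1.toNat (ps.getD p.1.toNat [] ++ [p.2]))
      (fun q hq => by rw [List.length_set]; exact hlt q (List.mem_cons_of_mem _ hq)) j hjlen
    by_cases h : p.1.toNat = j
    · rw [ihx, if_pos (by simpa using h), List.map_cons, ← h,
        pv_getD_set_self _ _ _ _ (hlt p List.mem_cons_self)]
      simp
    · rw [ihx, if_neg (by simpa using h), pv_getD_set_ne _ _ _ _ _ h]

lemma pv_positions (cs : List Char) (hcs : ∀ c ∈ cs, c.toNat < 128) (c : Char) (hc : c.toNat < 128) :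
    (cs.zipIdx.foldl (fun ps (p : Char × Nat) => ps.set p.1.toNat (ps.getD p.1.toNat [] ++ [p.2]))
      ((List.range 128).map (fun _ => ([] : List Nat)))).getD c.toNat [] = pvOcc cs c := by
  rw [pv_bucket_foldl cs.zipIdx _
      (fun p hp => by
        rw [List.length_map, List.length_range]
        exact hcs p.1 (List.fst_mem_of_mem_zipIdx hp))
      c.toNat (by rw [List.length_map, List.length_range]; exact hc)]
  have h0 : ((List.range 128).map (fun _ => ([] : List Nat))).getD c.toNat [] = [] := by
    have hlen : c.toNat < ((List.range 128).map (fun _ => ([] : List Nat))).length := by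
      rw [List.length_map, List.length_range]; exact hc
    rw [List.getD_eq_getElem?_getD, List.getElem?_eq_getElem hlen, Option.getD_some, List.getElem_map]
  rw [h0, List.nil_append, ← pv_occ_eq cs c]
  congr 1
  apply List.filter_congr
  intro p _
  have : (p.1.toNat == c.toNat) = (p.1 == c) := by
    by_cases h : p.1 = c
    · simp [h]
    · have : ¬ p.1.toNat = c.toNat := fun hh => h ((pv_char_toNat_inj _ _).mp hh)
      simp [h, this]
  rw [this]

-- ---- the pop(0) loop ----
lemma pv_cnt_lt (cs : List Char) (k : Nat) (hk : k < cs.length) :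
    ((PySem.List.sorted cs (fun c => c) false).take k).count
        ((PySem.List.sorted cs (fun c => c) false).getD k ' ')
      < (pvOcc cs ((PySem.List.sorted cs (fun c => c) false).getD k ' ')).length := by
  have hks : k < (PySem.List.sorted cs (fun c => c) false).length := by
    rw [PySem.List.length_sorted]; exact hk
  have hgd : (PySem.List.sorted cs (fun c => c) false).getD k ' '
      = (PySem.List.sorted cs (fun c => c) false)[k] := by
    rw [List.getD_eq_getElem?_getD, List.getElem?_eq_getElem hks, Option.getD_some]
  rw [pv_occ_length, hgd]
  have hperm : (PySem.List.sorted cs (fun c => c) false).Perm cs := PySem.List.sorted_perm _ _ _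
  rw [← hperm.count_eq]
  have htake : ((PySem.List.sorted cs (fun c => c) false).take (k+1))
      = ((PySem.List.sorted cs (fun c => c) false).take k) ++ [(PySem.List.sorted cs (fun c => c) false)[k]] := by
    rw [List.take_add_one, List.getElem?_eq_getElem hks]; rfl
  have hle : ((PySem.List.sorted cs (fun c => c) false).take (k+1)).count
      ((PySem.List.sorted cs (fun c => c) false)[k])
      ≤ (PySem.List.sorted cs (fun c => c) false).count ((PySem.List.sorted cs (fun c => c) false)[k]) :=
    (List.take_sublist _ _).count_le _
  rw [htake, List.count_append, List.count_singleton] at hle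
  simp only [beq_self_eq_true, if_pos] at hle
  omega

lemma pv_loop2_inv (cs : List Char) (hcs : ∀ c ∈ cs, c.toNat < 128) :
    ∀ (r k : Nat) (ps : List (List Nat)) (ls : List Nat), k + r = cs.length → ps.length = 128 →
      (∀ c : Char, c.toNat < 128 →
        ps.getD c.toNat [] = (pvOcc cs c).drop
          (((PySem.List.sorted cs (fun c => c) false).take k).count c)) →
      ((List.range' k r).foldl
        (fun (st : List (List Nat) × List Nat) k =>
          (st.1.set ((PySem.List.sorted cs (fun c => c) false).getD k ' ').toNat
             (st.1.getD ((PySem.List.sorted cs (fun c => c) false).getD k ' ').toNat []).tail,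
           st.2.set k ((st.1.getD ((PySem.List.sorted cs (fun c => c) false).getD k ' ').toNat []).headD 0)))
        (ps, ls)).2
        = (List.range' k r).foldl (fun a j => a.set j (pvL cs j)) ls := by
  intro r
  induction r with
  | zero => intro k ps ls _ _ _; rfl
  | succ r ih =>
    intro k ps ls hkr hps hinv
    have hk : k < cs.length := by omega
    have hks : k < (PySem.List.sorted cs (fun c => c) false).length := by
      rw [PySem.List.length_sorted]; exact hk
    have hgd : (PySem.List.sorted cs (fun c => c) false).getD k ' '
        = (PySem.List.sorted cs (fun c => c) false)[k] := by
      rw [List.getD_eq_getElem?_getD, List.getElem?_eq_getElem hks, Option.getD_some]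
    have hcmem : (PySem.List.sorted cs (fun c => c) false).getD k ' ' ∈ cs := by
      rw [hgd]
      have := List.getElem_mem hks
      rwa [PySem.List.mem_sorted] at this
    have hc128 : ((PySem.List.sorted cs (fun c => c) false).getD k ' ').toNat < 128 :=
      hcs _ hcmem
    have hbucket := hinv _ hc128
    have htake : ((PySem.List.sorted cs (fun c => c) false).take (k+1))
        = ((PySem.List.sorted cs (fun c => c) false).take k) ++ [(PySem.List.sorted cs (fun c => c) false)[k]] := by
      rw [List.take_add_one, List.getElem?_eq_getElem hks]; rfl
    rw [List.range'_succ, List.foldl_cons, List.foldl_cons]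
    have hhead : ((ps.getD ((PySem.List.sorted cs (fun c => c) false).getD k ' ').toNat []).headD 0) = pvL cs k := by
      rw [hbucket, pvL, List.headD_eq_head?_getD, List.head?_drop, List.getD_eq_getElem?_getD]
      simp only [List.getD_eq_getElem?_getD]
    rw [hhead]
    apply ih (k+1) _ _ (by omega) (by rw [List.length_set]; exact hps)
    intro c' hc'
    by_cases hcc : c' = (PySem.List.sorted cs (fun c => c) false).getD k ' '
    · subst hcc
      rw [pv_getD_set_self _ _ _ _ (by rw [hps]; exact hc'), hbucket, List.tail_drop, htake,
        List.count_append, hgd]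
      simp
    · have hne : ((PySem.List.sorted cs (fun c => c) false).getD k ' ').toNat ≠ c'.toNat :=
        fun hh => hcc ((pv_char_toNat_inj _ _).mp hh).symm
      rw [pv_getD_set_ne _ _ _ _ _ hne, hinv _ hc', htake, List.count_append]
      have : ((PySem.List.sorted cs (fun c => c) false)[k] : Char) ≠ c' := by
        rw [← hgd]; exact fun hh => hcc hh.symm
      simp [this]

theorem pv_take_set (l : List Nat) (k : Nat) (v : Nat) (h : k < l.length) : (l.set k v).take (k+1) = l.take k ++ [v] := by
  apply List.ext_getElem
  · simp; omega
  · intro i h1 h2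
    simp only [List.getElem_take, List.getElem_set, List.getElem_append, List.length_take]
    by_cases hik : i = k
    · subst hik; simp [h]
    · rw [if_neg (fun hh => hik hh.symm)]
      have : i < k := by simp at h1; omega
      rw [dif_pos (by omega)]

lemma pv_foldl_set_range' (f : Nat → Nat) :
    ∀ (r k : Nat) (ls : List Nat), k + r = ls.length →
      (List.range' k r).foldl (fun a j => a.set j (f j)) ls
        = ls.take k ++ (List.range' k r).map f := by
  intro r
  induction r with
  | zero =>
    intro k ls h
    have hk : ls.length ≤ k := by omega
    simp [List.take_of_length_le hk]
  | succ r ih =>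
    intro k ls h
    rw [List.range'_succ, List.foldl_cons, ih (k+1) _ (by rw [List.length_set]; omega),
      pv_take_set _ _ _ (by omega), List.map_cons]
    simp

lemma pv_left_eq (cs : List Char) (hcs : ∀ c ∈ cs, c.toNat < 128) :
    ((List.range cs.length).foldl
        (fun (st : List (List Nat) × List Nat) k =>
          (st.1.set ((PySem.List.sorted cs (fun c => c) false).getD k ' ').toNat
             (st.1.getD ((PySem.List.sorted cs (fun c => c) false).getD k ' ').toNat []).tail,
           st.2.set k ((st.1.getD ((PySem.List.sorted cs (fun c => c) false).getD k ' ').toNat []).headD 0)))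
        (cs.zipIdx.foldl (fun ps (p : Char × Nat) => ps.set p.1.toNat (ps.getD p.1.toNat [] ++ [p.2]))
          ((List.range 128).map (fun _ => ([] : List Nat))), List.replicate cs.length 0)).2
      = (List.range cs.length).map (pvL cs) := by
  have h2 := pv_loop2_inv cs hcs cs.length 0
      (cs.zipIdx.foldl (fun ps (p : Char × Nat) => ps.set p.1.toNat (ps.getD p.1.toNat [] ++ [p.2]))
        ((List.range 128).map (fun _ => ([] : List Nat))))
      (List.replicate cs.length 0) (by omega)
      (by rw [pv_bucket_len, List.length_map, List.length_range])
      (by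
        intro c hc
        rw [pv_positions cs hcs c hc]
        simp)
  have h3 := pv_foldl_set_range' (pvL cs) cs.length 0 (List.replicate cs.length 0) (by simp)
  rw [show (List.range cs.length) = List.range' 0 cs.length from List.range_eq_range', h2, h3]
  simp

-- ---- A's left_shift is pairwise-increasing in (key, index) and a permutation of range n ----
theorem pv_getD_eq_getElem (l : List Nat) (n : Nat) (h : n < l.length) : l.getD n 0 = l[n] := by
  rw [List.getD_eq_getElem?_getD, List.getElem?_eq_getElem h, Option.getD_some]

lemma pv_pvL_mem (cs : List Char) (k : Nat) (hk : k < cs.length) :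
    pvL cs k < cs.length ∧
    pvKey cs (pvL cs k) = (PySem.List.sorted cs (fun c => c) false).getD k ' ' := by
  have hcnt := pv_cnt_lt cs k hk
  have h0 : pvL cs k = (pvOcc cs ((PySem.List.sorted cs (fun c => c) false).getD k ' ')).getD
      (((PySem.List.sorted cs (fun c => c) false).take k).count
        ((PySem.List.sorted cs (fun c => c) false).getD k ' ')) 0 := rfl
  rw [pv_getD_eq_getElem _ _ hcnt] at h0
  exact (pv_mem_occ _ _ _).mp (h0 ▸ List.getElem_mem hcnt)

lemma pv_M_pairwise (cs : List Char) : ((List.range cs.length).map (pvL cs)).Pairwise (pvKlt cs) := by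
  rw [List.pairwise_iff_getElem]
  intro i j hi hj hij
  simp only [List.length_map, List.length_range] at hi hj
  simp only [List.getElem_map, List.getElem_range]
  have his : i < (PySem.List.sorted cs (fun c => c) false).length := by
    rw [PySem.List.length_sorted]; exact hi
  have hjs : j < (PySem.List.sorted cs (fun c => c) false).length := by
    rw [PySem.List.length_sorted]; exact hj
  have hgi : (PySem.List.sorted cs (fun c => c) false).getD i ' '
      = (PySem.List.sorted cs (fun c => c) false)[i] := by
    rw [List.getD_eq_getElem?_getD, List.getElem?_eq_getElem his, Option.getD_some]
  have hgj : (PySem.List.sorted cs (fun c => c) false).getD j ' '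
      = (PySem.List.sorted cs (fun c => c) false)[j] := by
    rw [List.getD_eq_getElem?_getD, List.getElem?_eq_getElem hjs, Option.getD_some]
  have hmono : (PySem.List.sorted cs (fun c => c) false)[i]
      ≤ (PySem.List.sorted cs (fun c => c) false)[j] :=
    PySem.List.sorted_id_getElem_mono cs (le_of_lt hij) hjs
  have hki := pv_pvL_mem cs i hi
  have hkj := pv_pvL_mem cs j hj
  rcases lt_or_eq_of_le hmono with hlt | heq
  · exact Or.inl (by rw [hki.2, hkj.2, hgi, hgj]; exact hlt)
  · refine Or.inr ⟨by rw [hki.2, hkj.2, hgi, hgj, heq], ?_⟩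
    have hcj : (PySem.List.sorted cs (fun c => c) false).getD j ' '
        = (PySem.List.sorted cs (fun c => c) false).getD i ' ' := by rw [hgi, hgj, heq]
    have hcnti := pv_cnt_lt cs i hi
    have hcntj := pv_cnt_lt cs j hj
    rw [hcj] at hcntj
    have htake : ((PySem.List.sorted cs (fun c => c) false).take (i+1))
        = ((PySem.List.sorted cs (fun c => c) false).take i) ++ [(PySem.List.sorted cs (fun c => c) false)[i]] := by
      rw [List.take_add_one, List.getElem?_eq_getElem his]; rfl
    have hsub : ((PySem.List.sorted cs (fun c => c) false).take (i+1)).Sublist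
        ((PySem.List.sorted cs (fun c => c) false).take j) := by
      have : (PySem.List.sorted cs (fun c => c) false).take (i+1)
          = ((PySem.List.sorted cs (fun c => c) false).take j).take (i+1) := by
        rw [List.take_take, min_eq_left (by omega)]
      rw [this]
      exact List.take_sublist _ _
    have hcle := hsub.count_le ((PySem.List.sorted cs (fun c => c) false).getD i ' ')
    rw [htake, List.count_append, List.count_singleton, hgi] at hcle
    simp only [beq_self_eq_true, if_pos] at hcle
    have hlt2 : ((PySem.List.sorted cs (fun c => c) false).take i).count
          ((PySem.List.sorted cs (fun c => c) false).getD i ' ')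
        < ((PySem.List.sorted cs (fun c => c) false).take j).count
          ((PySem.List.sorted cs (fun c => c) false).getD i ' ') := by
      rw [hgi]
      omega
    have hpair := List.pairwise_iff_getElem.mp
      (pv_occ_pairwise cs ((PySem.List.sorted cs (fun c => c) false).getD i ' '))
      _ _ hcnti hcntj hlt2
    have hLi : pvL cs i = (pvOcc cs ((PySem.List.sorted cs (fun c => c) false).getD i ' ')).getD
        (((PySem.List.sorted cs (fun c => c) false).take i).count
          ((PySem.List.sorted cs (fun c => c) false).getD i ' ')) 0 := rfl
    have hLj : pvL cs j = (pvOcc cs ((PySem.List.sorted cs (fun c => c) false).getD j ' ')).getD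
        (((PySem.List.sorted cs (fun c => c) false).take j).count
          ((PySem.List.sorted cs (fun c => c) false).getD j ' ')) 0 := rfl
    rw [hcj, pv_getD_eq_getElem _ _ hcntj] at hLj
    rw [pv_getD_eq_getElem _ _ hcnti] at hLi
    rw [hLi, hLj]
    exact hpair

lemma pv_M_perm (cs : List Char) : ((List.range cs.length).map (pvL cs)).Perm (List.range cs.length) := by
  have hnodup : ((List.range cs.length).map (pvL cs)).Nodup := by
    refine (pv_M_pairwise cs).imp ?_
    intro a b hab
    rcases hab with h | ⟨_, h⟩
    · exact fun he => absurd (he ▸ h) (lt_irrefl _)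
    · omega
  have hsub : ((List.range cs.length).map (pvL cs)) ⊆ List.range cs.length := by
    intro x hx
    rcases List.mem_map.mp hx with ⟨k, hk, rfl⟩
    exact List.mem_range.mpr (pv_pvL_mem cs k (List.mem_range.mp hk)).1
  exact (List.subperm_of_subset hnodup hsub).perm_of_length_le (by simp)

-- ---- B's counting sort: counts, offsets, scatter ----
lemma pv_base_add (cs : List Char) (c : Nat) :
    pvBase cs (c+1) = pvBase cs c + (pvOccC cs c).length := by
  unfold pvBase
  rw [List.range_succ, List.map_append, List.sum_append]
  simp

lemma pv_base_mono (cs : List Char) (a b : Nat) (h : a ≤ b) : pvBase cs a ≤ pvBase cs b := by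
  induction b with
  | zero =>
    have : a = 0 := by omega
    rw [this]
  | succ b ih =>
    by_cases hab : a = b + 1
    · rw [hab]
    · have h1 := ih (by omega)
      have h2 := pv_base_add cs b
      omega

lemma pv_count_range_zero (v : Nat) :
    ∀ K, K ≤ v → ((List.range K).map (fun c => if v = c then 1 else 0)).sum = 0 := by
  intro K
  induction K with
  | zero => intro _; simp
  | succ K ih =>
    intro h
    rw [List.range_succ, List.map_append, List.sum_append, ih (by omega)]
    have : v ≠ K := by omega
    simp [this]

lemma pv_count_range_one (v K : Nat) (h : v < K) :
    ((List.range K).map (fun c => if v = c then 1 else 0)).sum = 1 := by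
  induction K with
  | zero => omega
  | succ K ih =>
    rw [List.range_succ, List.map_append, List.sum_append]
    by_cases hv : v = K
    · subst hv
      rw [pv_count_range_zero v v le_rfl]
      simp
    · rw [ih (by omega)]
      simp [hv]

lemma pv_sum_filter_len (K : Nat) (g : Nat → Nat) :
    ∀ (xs : List Nat), (∀ x ∈ xs, g x < K) →
      ((List.range K).map (fun c => (xs.filter (fun i => g i == c)).length)).sum = xs.length := by
  intro xs
  induction xs with
  | nil => intro _; simp
  | cons x t ih =>
    intro h
    have hx : g x < K := h x List.mem_cons_self
    have ht := ih (fun y hy => h y (List.mem_cons_of_mem _ hy))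
    have hstep : ∀ c ∈ List.range K, ((x :: t).filter (fun i => g i == c)).length
        = (if g x = c then 1 else 0) + (t.filter (fun i => g i == c)).length := by
      intro c _
      rw [List.filter_cons]
      by_cases hc : g x = c
      · simp [hc, Nat.add_comm]
      · simp [hc]
    rw [List.map_congr_left hstep, List.sum_map_add, pv_count_range_one (g x) K hx, ht]
    simp [Nat.add_comm]

lemma pv_base_top (cs : List Char) (hcs : ∀ ch ∈ cs, ch.toNat < 128) :
    pvBase cs 128 = cs.length := by
  have hg : ∀ x ∈ List.range cs.length, pvCode cs x < 128 := by
    intro x hx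
    have hxn : x < cs.length := List.mem_range.mp hx
    have hgd : cs.getD x ' ' = cs[x] := by
      rw [List.getD_eq_getElem?_getD, List.getElem?_eq_getElem hxn, Option.getD_some]
    unfold pvCode
    rw [hgd]
    exact hcs _ (List.getElem_mem hxn)
  have h := pv_sum_filter_len 128 (pvCode cs) (List.range cs.length) hg
  rw [List.length_range] at h
  unfold pvBase pvOccC
  exact h

lemma pv_occC_length (cs : List Char) (c : Nat) :
    (pvOccC cs c).length = cs.countP (fun ch => ch.toNat == c) := by
  have hmap : (List.range cs.length).map (fun i => cs.getD i ' ') = cs := by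
    apply List.ext_getElem
    · simp
    · intro i h1 h2
      rw [List.getElem_map, List.getElem_range, List.getD_eq_getElem?_getD,
        List.getElem?_eq_getElem h2, Option.getD_some]
  rw [pvOccC, ← List.countP_eq_length_filter]
  conv_rhs => rw [← hmap]
  rw [List.countP_map]
  rfl

lemma pv_counts_foldl :
    ∀ (l : List Char) (a : List Nat), (∀ ch ∈ l, ch.toNat < a.length) →
      ∀ c, c < a.length →
      (l.foldl (fun a ch => a.set ch.toNat (a.getD ch.toNat 0 + 1)) a).getD c 0
        = a.getD c 0 + l.countP (fun ch => ch.toNat == c) := by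
  intro l
  induction l with
  | nil => intro a _ c _; simp
  | cons ch t ih =>
    intro a h c hc
    rw [List.foldl_cons, List.countP_cons]
    have hlen : (a.set ch.toNat (a.getD ch.toNat 0 + 1)).length = a.length := List.length_set
    rw [ih _ (fun x hx => by rw [hlen]; exact h x (List.mem_cons_of_mem _ hx)) c (by rw [hlen]; exact hc)]
    by_cases hcc : ch.toNat = c
    · rw [← hcc, pv_getD_set_self _ _ _ _ (h ch List.mem_cons_self)]
      simp
      omega
    · rw [pv_getD_set_ne _ _ _ _ _ hcc]
      simp [hcc]

lemma pv_offs_foldl (cs : List Char) (cnt : List Nat)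
    (hcnt : ∀ c, c < 128 → cnt.getD c 0 = (pvOccC cs c).length) :
    ∀ (r k : Nat) (arr : List Nat) (tot : Nat), k + r ≤ 128 → arr.length = 128 →
      tot = pvBase cs k → (∀ c, c < k → arr.getD c 0 = pvBase cs c) →
      ((List.range' k r).foldl
          (fun (st : List Nat × Nat) c => (st.1.set c st.2, st.2 + cnt.getD c 0)) (arr, tot)).1.length = 128
      ∧ ∀ c, c < k + r →
        ((List.range' k r).foldl
          (fun (st : List Nat × Nat) c => (st.1.set c st.2, st.2 + cnt.getD c 0)) (arr, tot)).1.getD c 0 = pvBase cs c := by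
  intro r
  induction r with
  | zero =>
    intro k arr tot hkr hlen htot hinv
    exact ⟨hlen, fun c hc => hinv c (by omega)⟩
  | succ r ih =>
    intro k arr tot hkr hlen htot hinv
    rw [List.range'_succ, List.foldl_cons]
    have hres := ih (k+1) (arr.set k tot) (tot + cnt.getD k 0) (by omega)
      (by rw [List.length_set]; exact hlen)
      (by rw [htot, hcnt k (by omega), ← pv_base_add])
      (by
        intro c hck
        by_cases hcc : c = k
        · rw [hcc, pv_getD_set_self _ _ _ _ (by rw [hlen]; omega), htot]
        · rw [pv_getD_set_ne _ _ _ _ _ (fun hh => hcc hh.symm)]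
          exact hinv c (by omega))
    exact ⟨hres.1, fun c hc => hres.2 c (by omega)⟩

lemma pv_dropTake_set {α : Type} (l : List α) (m a b : Nat) (v : α) (h : m < a ∨ a + b ≤ m) :
    ((l.set m v).drop a).take b = (l.drop a).take b := by
  apply List.ext_getElem
  · simp
  · intro i h1 h2
    rw [List.length_take, List.length_drop, List.length_set] at h1
    have hib : i < b := by omega
    simp only [List.getElem_take, List.getElem_drop, List.getElem_set]
    rw [if_neg (by omega)]

lemma pv_dropTake_set_snoc {α : Type} (l : List α) (a k : Nat) (v : α) (hk : a + k < l.length) :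
    (((l.set (a+k) v).drop a).take (k+1)) = ((l.drop a).take k) ++ [v] := by
  rw [List.take_add_one]
  have h1 : ((l.set (a+k) v).drop a)[k]? = some v := by
    rw [List.getElem?_drop, List.getElem?_set_self (by simpa using hk)]
  rw [h1, pv_dropTake_set l (a+k) a k v (Or.inr le_rfl)]
  rfl

lemma pv_scatter_inv (cs : List Char) (hcs : ∀ ch ∈ cs, ch.toNat < 128) :
    ∀ (t : List Char) (m : Nat) (offs ls : List Nat),
      cs.drop m = t → m + t.length = cs.length →
      offs.length = 128 → ls.length = cs.length →
      (∀ c, c < 128 → offs.getD c 0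
          = pvBase cs c + ((List.range m).filter (fun i => pvCode cs i == c)).length) →
      (∀ c, c < 128 → ((ls.drop (pvBase cs c)).take (((List.range m).filter (fun i => pvCode cs i == c)).length))
          = (List.range m).filter (fun i => pvCode cs i == c)) →
      ((t.zipIdx m).foldl
          (fun (st : List Nat × List Nat) (p : Char × Nat) =>
            (st.1.set p.1.toNat (st.1.getD p.1.toNat 0 + 1), st.2.set (st.1.getD p.1.toNat 0) p.2))
          (offs, ls)).2.length = cs.length
      ∧ ∀ c, c < 128 →
        ((((t.zipIdx m).foldl
          (fun (st : List Nat × List Nat) (p : Char × Nat) =>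
            (st.1.set p.1.toNat (st.1.getD p.1.toNat 0 + 1), st.2.set (st.1.getD p.1.toNat 0) p.2))
          (offs, ls)).2.drop (pvBase cs c)).take ((pvOccC cs c).length)) = pvOccC cs c := by
  intro t
  induction t with
  | nil =>
    intro m offs ls hdrop hmlen hol hll hoff hseg
    simp only [List.zipIdx_nil, List.foldl_nil]
    have hm : m = cs.length := by simpa using hmlen
    refine ⟨hll, fun c hc => ?_⟩
    have hs := hseg c hc
    rw [hm] at hs
    exact hs
  | cons ch t ih =>
    intro m offs ls hdrop hmlen hol hll hoff hseg
    have hm : m < cs.length := by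
      have : (ch :: t).length = t.length + 1 := List.length_cons
      omega
    have hch : cs.getD m ' ' = ch := by
      have h0 : cs[m]? = some ch := by
        have hd := List.getElem?_drop (xs := cs) (i := m) (j := 0)
        rw [hdrop] at hd
        simpa using hd.symm
      rw [List.getD_eq_getElem?_getD, h0]
      rfl
    have hc0 : pvCode cs m = ch.toNat := by rw [pvCode, hch]
    have h128 : ch.toNat < 128 := by
      have hmem : ch ∈ cs := by
        have : ch ∈ cs.drop m := by rw [hdrop]; exact List.mem_cons_self
        exact List.mem_of_mem_drop this
      exact hcs ch hmem
    have hsucc_filter : (List.range (m+1)).filter (fun i => pvCode cs i == ch.toNat)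
        = (List.range m).filter (fun i => pvCode cs i == ch.toNat) ++ [m] := by
      rw [List.range_succ, List.filter_append]
      simp [hc0]
    have hκlt : ((List.range m).filter (fun i => pvCode cs i == ch.toNat)).length + 1
        ≤ (pvOccC cs ch.toNat).length := by
      have hsub : ((List.range (m+1)).filter (fun i => pvCode cs i == ch.toNat)).Sublist
          ((List.range cs.length).filter (fun i => pvCode cs i == ch.toNat)) :=
        List.Sublist.filter _ (List.range_sublist.mpr hm)
      have hle := hsub.length_le
      rw [hsucc_filter, List.length_append] at hle
      rw [pvOccC]
      simpa using hle
    have ho_lt : pvBase cs ch.toNat + ((List.range m).filter (fun i => pvCode cs i == ch.toNat)).length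
        < cs.length := by
      have h1 := pv_base_add cs ch.toNat
      have h2 : pvBase cs (ch.toNat+1) ≤ pvBase cs 128 := pv_base_mono cs _ _ (by omega)
      have h3 := pv_base_top cs hcs
      omega
    have hoval := hoff _ h128
    rw [List.zipIdx_cons, List.foldl_cons]
    refine ih (m+1) _ _ ?_ ?_ ?_ ?_ ?_ ?_
    · have h1 : List.drop 1 (List.drop m cs) = List.drop (m + 1) cs := List.drop_drop
      rw [← h1, hdrop]
      rfl
    · have : (ch :: t).length = t.length + 1 := List.length_cons
      omega
    · rw [List.length_set]; exact hol
    · rw [List.length_set]; exact hll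
    · intro c hc
      by_cases hcc : ch.toNat = c
      · subst hcc
        rw [pv_getD_set_self _ _ _ _ (by rw [hol]; exact h128), hoval, hsucc_filter,
          List.length_append]
        simp
        omega
      · rw [pv_getD_set_ne _ _ _ _ _ hcc, hoff c hc]
        have hfeq : (List.range (m+1)).filter (fun i => pvCode cs i == c)
            = (List.range m).filter (fun i => pvCode cs i == c) := by
          rw [List.range_succ, List.filter_append]
          simp [hc0, hcc]
        rw [hfeq]
    · intro c hc
      by_cases hcc : ch.toNat = c
      · subst hcc
        rw [hoval, hsucc_filter]
        simp only [List.length_append, List.length_singleton]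
        rw [pv_dropTake_set_snoc ls (pvBase cs ch.toNat)
            ((List.range m).filter (fun i => pvCode cs i == ch.toNat)).length m
            (by rw [hll]; exact ho_lt),
          hseg _ h128]
      · have hfeq : (List.range (m+1)).filter (fun i => pvCode cs i == c)
            = (List.range m).filter (fun i => pvCode cs i == c) := by
          rw [List.range_succ, List.filter_append]
          simp [hc0, hcc]
        rw [hfeq, hoval]
        have hκc : ((List.range m).filter (fun i => pvCode cs i == c)).length
            ≤ (pvOccC cs c).length := by
          have hsub : ((List.range m).filter (fun i => pvCode cs i == c)).Sublist
              ((List.range cs.length).filter (fun i => pvCode cs i == c)) :=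
            List.Sublist.filter _ (List.range_sublist.mpr (le_of_lt hm))
          rw [pvOccC]
          exact hsub.length_le
        rw [pv_dropTake_set ls
            (pvBase cs ch.toNat + ((List.range m).filter (fun i => pvCode cs i == ch.toNat)).length)
            (pvBase cs c) (((List.range m).filter (fun i => pvCode cs i == c)).length) m ?side]
        · exact hseg c hc
        case side =>
          rcases Nat.lt_or_ge ch.toNat c with hlt | hge
          · have h1 : pvBase cs (ch.toNat+1) ≤ pvBase cs c := pv_base_mono cs _ _ (by omega)
            have h2 := pv_base_add cs ch.toNat
            left
            omega
          · have h1 := pv_base_add cs c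
            have h2 : pvBase cs (c+1) ≤ pvBase cs ch.toNat := pv_base_mono cs _ _ (by omega)
            right
            omega

lemma pv_tiling {α : Type} :
    ∀ (segs : List (List α)) (l : List α), l.length = (segs.map List.length).sum →
      (∀ j, (hj : j < segs.length) →
        ((l.drop (((segs.take j).map List.length).sum)).take segs[j].length) = segs[j]) →
      l = segs.flatten := by
  intro segs
  induction segs with
  | nil =>
    intro l h _
    exact List.eq_nil_of_length_eq_zero (by simpa using h)
  | cons s rest ih =>
    intro l hlen hseg
    have h0 := hseg 0 (by simp)
    simp only [List.take_zero, List.map_nil, List.sum_nil, List.drop_zero, List.getElem_cons_zero] at h0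
    have hrest : l.drop s.length = rest.flatten := by
      apply ih
      · rw [List.length_drop, hlen]
        simp
      · intro j hj
        have hsj := hseg (j+1) (by simpa using hj)
        rw [List.take_succ_cons, List.map_cons, List.sum_cons] at hsj
        simp only [List.getElem_cons_succ] at hsj
        rw [List.drop_drop]
        exact hsj
    conv_lhs => rw [← List.take_append_drop s.length l]
    rw [List.flatten_cons, hrest, h0]

set_option maxRecDepth 8000 in
set_option maxHeartbeats 2000000 in
lemma pv_scatter_eq_flatten (cs : List Char) (hcs : ∀ ch ∈ cs, ch.toNat < 128) :
    (cs.zipIdx.foldl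
        (fun (st : List Nat × List Nat) (p : Char × Nat) =>
          (st.1.set p.1.toNat (st.1.getD p.1.toNat 0 + 1), st.2.set (st.1.getD p.1.toNat 0) p.2))
        (((List.range 128).foldl
            (fun (st : List Nat × Nat) c => (st.1.set c st.2, st.2 +
              (cs.foldl (fun a ch => a.set ch.toNat (a.getD ch.toNat 0 + 1)) (List.replicate 128 0)).getD c 0))
            (List.replicate 128 0, 0)).1,
         List.replicate cs.length 0)).2
      = (pvSegs cs).flatten := by
  have hcntfun : ∀ c, c < 128 →
      (cs.foldl (fun a ch => a.set ch.toNat (a.getD ch.toNat 0 + 1)) (List.replicate 128 0)).getD c 0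
        = (pvOccC cs c).length := by
    intro c hc
    have hrep : (List.replicate 128 (0:Nat)).getD c 0 = 0 := by
      rw [List.getD_eq_getElem?_getD, List.getElem?_replicate]
      split <;> rfl
    rw [pv_counts_foldl cs (List.replicate 128 0)
        (by intro ch hch; rw [List.length_replicate]; exact hcs ch hch) c
        (by rw [List.length_replicate]; exact hc),
      pv_occC_length, hrep, Nat.zero_add]
  have hoffs := pv_offs_foldl cs _ hcntfun 128 0 (List.replicate 128 0) 0 (by omega)
      (by simp) (by simp [pvBase]) (by intro c hc; omega)
  rw [List.range_eq_range']
  have hsc := pv_scatter_inv cs hcs cs 0 _ (List.replicate cs.length 0)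
      (by rw [List.drop_zero]) (by rw [Nat.zero_add]) hoffs.1 (by rw [List.length_replicate])
      (by intro c hc; rw [hoffs.2 c (by omega)]; simp)
      (by intro c hc; simp)
  refine pv_tiling (pvSegs cs) _ ?_ ?_
  · rw [hsc.1]
    have hb := pv_base_top cs hcs
    rw [pvBase] at hb
    rw [pvSegs, List.map_map]
    exact (by simpa [Function.comp] using hb.symm)
  · intro j hj
    have hj128 : j < 128 := by simpa [pvSegs] using hj
    have hpsum : ((((List.range 128).map (pvOccC cs)).take j).map List.length).sum = pvBase cs j := by
      rw [← List.map_take, List.take_range, min_eq_left (le_of_lt hj128), List.map_map]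
      rfl
    simp only [pvSegs, List.getElem_map, List.getElem_range, hpsum]
    exact hsc.2 j hj128


lemma pv_mem_occC (cs : List Char) (c i : Nat) :
    i ∈ pvOccC cs c ↔ i < cs.length ∧ pvCode cs i = c := by
  simp [pvOccC, List.mem_filter, List.mem_range]

lemma pv_flatten_pairwise (cs : List Char) :
    (pvSegs cs).flatten.Pairwise (pvKlt cs) := by
  rw [List.pairwise_flatten]
  constructor
  · intro l hl
    rw [pvSegs] at hl
    rcases List.mem_map.mp hl with ⟨c, _, rfl⟩
    have hp : (pvOccC cs c).Pairwise (· < ·) := List.Pairwise.filter _ List.pairwise_lt_range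
    refine hp.imp_of_mem ?_
    intro a b ha hb hab
    have hca : pvCode cs a = c := ((pv_mem_occC cs c a).mp ha).2
    have hcb : pvCode cs b = c := ((pv_mem_occC cs c b).mp hb).2
    refine Or.inr ⟨?_, hab⟩
    exact (pv_char_toNat_inj _ _).mp (by
      rw [show (pvKey cs a).toNat = pvCode cs a from rfl,
        show (pvKey cs b).toNat = pvCode cs b from rfl, hca, hcb])
  · rw [pvSegs, List.pairwise_map]
    refine List.pairwise_lt_range.imp ?_
    intro c1 c2 h12 x hx y hy
    refine Or.inl ?_
    apply pv_char_lt_of_toNat_lt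
    have hx2 : pvCode cs x = c1 := ((pv_mem_occC cs c1 x).mp hx).2
    have hy2 : pvCode cs y = c2 := ((pv_mem_occC cs c2 y).mp hy).2
    rw [show (pvKey cs x).toNat = pvCode cs x from rfl,
      show (pvKey cs y).toNat = pvCode cs y from rfl, hx2, hy2]
    exact h12

lemma pv_flatten_perm (cs : List Char) (hcs : ∀ ch ∈ cs, ch.toNat < 128) :
    (pvSegs cs).flatten.Perm (List.range cs.length) := by
  have hnodup : (pvSegs cs).flatten.Nodup := by
    refine (pv_flatten_pairwise cs).imp ?_
    intro a b hab
    rcases hab with h | ⟨_, h⟩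
    · exact fun he => absurd (he ▸ h) (lt_irrefl _)
    · omega
  have hsub : (pvSegs cs).flatten ⊆ List.range cs.length := by
    intro x hx
    rcases List.mem_flatten.mp hx with ⟨l, hl, hxl⟩
    rw [pvSegs] at hl
    rcases List.mem_map.mp hl with ⟨c, _, rfl⟩
    exact List.mem_range.mpr ((pv_mem_occC cs c x).mp hxl).1
  refine (List.subperm_of_subset hnodup hsub).perm_of_length_le ?_
  rw [List.length_range, List.length_flatten, pvSegs, List.map_map]
  have hb := pv_base_top cs hcs
  rw [pvBase] at hb
  exact le_of_eq (by simpa [Function.comp] using hb.symm)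

lemma pv_flatten_eq_M (cs : List Char) (hcs : ∀ ch ∈ cs, ch.toNat < 128) :
    (pvSegs cs).flatten = (List.range cs.length).map (pvL cs) := by
  refine pv_eq_of_perm_of_pairwise cs _ _ ?_ (pv_flatten_pairwise cs) (pv_M_pairwise cs)
  exact (pv_flatten_perm cs hcs).trans (pv_M_perm cs).symm

-- ---- chain loops ----
lemma pv_chainB (ls : List Nat) (cs : List Char) :
    ∀ (l : List Nat) (acc : List Char) (cur : Nat),
      l.foldl (fun (st : List Char × Nat) _ =>
          (st.1 ++ [cs.getD (ls.getD st.2 0) ' '], ls.getD st.2 0)) (acc, cur)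
        = (acc ++ pvChain ls cs cur l.length, pvEnd ls cur l.length) := by
  intro l
  induction l with
  | nil => intro acc cur; simp [pvChain, pvEnd]
  | cons x t ih =>
    intro acc cur
    rw [List.foldl_cons, ih]
    simp [pvChain, pvEnd]

lemma pv_chainA (ls : List Nat) (cs : List Char) (n : Nat) :
    ∀ (r k : Nat) (dec : List Char) (cur : Nat), k + r = n → r ≤ dec.length →
      (List.range' k r).foldl (fun (st : List Char × Nat) i =>
          (st.1.set (n - 1 - i) (cs.getD (ls.getD st.2 0) ' '), ls.getD st.2 0)) (dec, cur)
        = ((pvChain ls cs cur r).reverse ++ dec.drop r, pvEnd ls cur r) := by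
  intro r
  induction r with
  | zero => intro k dec cur h hlen; simp [pvChain, pvEnd]
  | succ r ih =>
    intro k dec cur h hlen
    rw [List.range'_succ, List.foldl_cons]
    have hnk : n - 1 - k = r := by omega
    have hr : r < dec.length := by omega
    rw [ih (k+1) _ _ (by omega) (by simp; omega)]
    simp only [hnk, pvChain, pvEnd]
    rw [pv_drop_set _ _ _ hr]
    simp

-- ===== VERDICT (by name: the statement is the Claim_ definition above) =====
theorem burrows_wheeler_decode_spec : Claim_equal_burrows_wheeler_decode := by
  intro bwt_string add_char hdom _hpre
  unfold Spec_burrows_wheeler_decode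
  have hchars : ∀ c ∈ bwt_string.toList, c.toNat < 128 := by
    intro c hc
    have h1 : pvDomStr bwt_string = true := by
      unfold Dom_burrows_wheeler_decode at hdom
      exact ((Bool.and_eq_true _ _).mp hdom).1
    unfold pvDomStr at h1
    rw [List.all_eq_true] at h1
    have h2 := h1 c hc
    unfold pvDomChar at h2
    simp only [Bool.or_eq_true, Bool.and_eq_true, decide_eq_true_eq, beq_iff_eq] at h2
    omega
  dsimp only [burrows_wheeler_decode, burrows_wheeler_decode_alt]
  rw [pv_left_eq bwt_string.toList hchars, pv_scatter_eq_flatten bwt_string.toList hchars,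
    pv_flatten_eq_M bwt_string.toList hchars]
  rw [show List.range bwt_string.toList.length = List.range' 0 bwt_string.toList.length
    from List.range_eq_range']
  rw [pv_chainA ((List.range' 0 bwt_string.toList.length).map (pvL bwt_string.toList))
      bwt_string.toList bwt_string.toList.length bwt_string.toList.length 0
      (List.replicate bwt_string.toList.length ' ')
      (PySem.Chars.find bwt_string.toList add_char.toList).toNat (by omega) (by simp)]
  rw [pv_chainB ((List.range' 0 bwt_string.toList.length).map (pvL bwt_string.toList))
      bwt_string.toList (List.range' 0 bwt_string.toList.length) []
      (PySem.Chars.find bwt_string.toList add_char.toList).toNat]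
  simp [List.length_range']
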